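-- pv_equiv track=rewrite | github.com/drewhayward/advent-of-code-2015 | day03/houses.py | find_visited
-- ===== SOURCE A (Python) =====
-- def find_visited(moves):
--     x, y = (0,0)
--     visited = set()
--     visited.add((x,y))
--     for move in moves:
--         if move == '^':
--             y += 1
--         elif move == 'v':
--             y -= 1
--         elif move == '<':
--             x -= 1
--         elif move == '>':
--             x += 1
--         visited.add((x,y))
--     return visited
-- ===== SOURCE B (Python) =====
-- def prefix_sums(moves, plus, minus):
--     total = 0
--     out = [0]
--     for m in moves:
--         total += (m == plus) - (m == minus)
--         out.append(total)
--     return out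
--
-- def find_visited(moves):
--     # decompose the walk into two independent coordinate channels:
--     # x is the prefix sum of '>'/'<' signs, y the prefix sum of '^'/'v' signs;
--     # the visited set is the deduplicated zip of the two prefix-sum sequences.
--     return set(zip(prefix_sums(moves, '>', '<'), prefix_sums(moves, '^', 'v')))
-- ===== Notes on version B (the rewrite author's own statement) =====
-- stated objective: alternative
-- what changed: B abandons A's single stateful walk (branch chain updating (x,y) and inserting into a set each step) for a staged pipeline: two independent coordinate-wise prefix-sum passes (x from '>'/'<', y from '^'/'v' using boolean arithmetic), zipped into the position trail and deduplicated once with set().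
import Mathlib
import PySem

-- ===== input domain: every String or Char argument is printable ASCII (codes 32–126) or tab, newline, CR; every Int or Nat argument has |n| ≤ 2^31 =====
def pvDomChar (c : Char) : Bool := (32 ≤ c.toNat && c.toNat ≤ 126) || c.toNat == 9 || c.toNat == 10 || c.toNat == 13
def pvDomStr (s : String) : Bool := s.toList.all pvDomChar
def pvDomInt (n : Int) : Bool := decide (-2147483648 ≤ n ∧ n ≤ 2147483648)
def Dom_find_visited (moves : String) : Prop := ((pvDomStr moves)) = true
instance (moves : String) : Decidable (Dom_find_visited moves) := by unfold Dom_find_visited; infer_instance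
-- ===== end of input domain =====

-- B replaces A's single stateful walk by two independent coordinate-wise prefix-sum
-- passes zipped into the trail and deduplicated once (objective: alternative).


-- ===== PORT A =====
def find_visited (moves : String) : List (Int × Int) :=
  let visited : PySem.Set (Int × Int) := PySem.Set.add PySem.Set.empty ((0 : Int), (0 : Int))
  let st := moves.toList.foldl
    (fun (st : (Int × Int) × PySem.Set (Int × Int)) move =>
      let p :=
        if move = '^' then (st.1.1, st.1.2 + 1)
        else if move = 'v' then (st.1.1, st.1.2 - 1)
        else if move = '<' then (st.1.1 - 1, st.1.2)
        else if move = '>' then (st.1.1 + 1, st.1.2)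
        else st.1
      (p, PySem.Set.add st.2 p))
    (((0 : Int), (0 : Int)), visited)
  st.2

-- ===== PORT B =====
def prefix_sums (moves : List Char) (plus minus : Char) : List Int :=
  let st := moves.foldl
    (fun (st : Int × List Int) m =>
      let t := st.1 + (if m = plus then (1 : Int) else 0) - (if m = minus then (1 : Int) else 0)
      (t, st.2 ++ [t]))
    ((0 : Int), [(0 : Int)])
  st.2

def find_visited_alt (moves : String) : List (Int × Int) :=
  PySem.Set.ofList
    (List.zip (prefix_sums moves.toList '>' '<') (prefix_sums moves.toList '^' 'v'))

-- ===== PRECONDITION & SPEC =====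
def Spec_find_visited (moves : String) (out : List (Int × Int)) : Prop := out = find_visited_alt moves
instance (moves : String) (out : List (Int × Int)) : Decidable (Spec_find_visited moves out) := by unfold Spec_find_visited; infer_instance

-- ===== CLAIM =====
def Claim_equal_find_visited : Prop := ∀ (moves : String), Dom_find_visited moves → Spec_find_visited moves (find_visited moves)

-- ===== LEMMAS AND PROOFS =====

-- A's per-move step, as a function
def pvStep (c : Char) (p : Int × Int) : Int × Int :=
  if c = '^' then (p.1, p.2 + 1)
  else if c = 'v' then (p.1, p.2 - 1)
  else if c = '<' then (p.1 - 1, p.2)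
  else if c = '>' then (p.1 + 1, p.2)
  else p

-- the list of positions visited after the start
def pvWalk : List Char → (Int × Int) → List (Int × Int)
  | [], _ => []
  | c :: t, p => pvStep c p :: pvWalk t (pvStep c p)

def pvEnd : List Char → (Int × Int) → Int × Int
  | [], p => p
  | c :: t, p => pvEnd t (pvStep c p)

-- per-character coordinate delta of B
def pvD (c plus minus : Char) : Int :=
  (if c = plus then (1 : Int) else 0) - (if c = minus then (1 : Int) else 0)

-- the prefix sums after the initial value
def pvTail : List Char → Char → Char → Int → List Int
  | [], _, _, _ => []
  | c :: t, pl, mi, v => (v + pvD c pl mi) :: pvTail t pl mi (v + pvD c pl mi)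

def pvLastV : List Char → Char → Char → Int → Int
  | [], _, _, v => v
  | c :: t, pl, mi, v => pvLastV t pl mi (v + pvD c pl mi)

theorem pv_A_fold (l : List Char) (x y : Int) (acc : List (Int × Int)) :
    l.foldl
      (fun (st : (Int × Int) × PySem.Set (Int × Int)) move =>
        let p :=
          if move = '^' then (st.1.1, st.1.2 + 1)
          else if move = 'v' then (st.1.1, st.1.2 - 1)
          else if move = '<' then (st.1.1 - 1, st.1.2)
          else if move = '>' then (st.1.1 + 1, st.1.2)
          else st.1
        (p, PySem.Set.add st.2 p))
      ((x, y), PySem.Set.ofList acc)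
    = (pvEnd l (x, y), PySem.Set.ofList (acc ++ pvWalk l (x, y))) := by
  induction l generalizing x y acc with
  | nil => simp [pvWalk, pvEnd]
  | cons c t ih =>
      simp only [List.foldl_cons, pvWalk, pvEnd]
      have hstep :
          (if c = '^' then (x, y + 1)
           else if c = 'v' then (x, y - 1)
           else if c = '<' then (x - 1, y)
           else if c = '>' then (x + 1, y)
           else (x, y)) = pvStep c (x, y) := by
        simp [pvStep]
      simp only [hstep, ← PySem.Set.ofList_append_singleton]
      rcases pvStep c (x, y) with ⟨x', y'⟩
      rw [ih x' y' (acc ++ [(x', y')])]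
      simp

theorem pv_B_fold (l : List Char) (pl mi : Char) (v : Int) (acc : List Int) :
    l.foldl
      (fun (st : Int × List Int) m =>
        let t := st.1 + (if m = pl then (1 : Int) else 0) - (if m = mi then (1 : Int) else 0)
        (t, st.2 ++ [t]))
      (v, acc)
    = (pvLastV l pl mi v, acc ++ pvTail l pl mi v) := by
  induction l generalizing v acc with
  | nil => simp [pvLastV, pvTail]
  | cons c t ih =>
      simp only [List.foldl_cons, pvLastV, pvTail]
      have : v + (if c = pl then (1 : Int) else 0) - (if c = mi then (1 : Int) else 0)
           = v + pvD c pl mi := by unfold pvD; ring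
      simp only [this]
      rw [ih (v + pvD c pl mi) (acc ++ [v + pvD c pl mi])]
      simp

theorem pv_step_coords (c : Char) (x y : Int) :
    pvStep c (x, y) = (x + pvD c '>' '<', y + pvD c '^' 'v') := by
  by_cases h1 : c = '^'
  · subst h1; simp [pvStep, pvD]
  by_cases h2 : c = 'v'
  · subst h2; simp [pvStep, pvD, sub_eq_add_neg]
  by_cases h3 : c = '<'
  · subst h3; simp [pvStep, pvD, sub_eq_add_neg]
  by_cases h4 : c = '>'
  · subst h4; simp [pvStep, pvD]
  · simp [pvStep, pvD, h1, h2, h3, h4]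

theorem pv_zip_walk (l : List Char) (x y : Int) :
    List.zip (x :: pvTail l '>' '<' x) (y :: pvTail l '^' 'v' y)
    = (x, y) :: pvWalk l (x, y) := by
  induction l generalizing x y with
  | nil => simp [pvTail, pvWalk]
  | cons c t ih =>
      simp only [pvTail, pvWalk, List.zip_cons_cons, pv_step_coords]
      rw [← ih (x + pvD c '>' '<') (y + pvD c '^' 'v')]
      simp [List.zip_cons_cons]

-- ===== VERDICT =====
theorem find_visited_spec : Claim_equal_find_visited := by
  intro moves _
  show find_visited moves = find_visited_alt moves
  unfold find_visited find_visited_alt prefix_sums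
  have h0 : PySem.Set.add PySem.Set.empty ((0 : Int), (0 : Int))
      = PySem.Set.ofList [((0 : Int), (0 : Int))] := by decide
  simp only [h0, pv_A_fold, pv_B_fold]
  have h := pv_zip_walk moves.toList 0 0
  simp only [List.zip_cons_cons, List.cons.injEq, true_and] at h
  simp [h]
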